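-- pv_equiv track=rewrite | github.com/RajPorus19/jobkiller | jobscraper/indeed/indeed_job_list.py | double_quote_json_fields
-- ===== SOURCE A (Python) =====
-- def double_quote_json_fields(jsonStr):
--     jsonStr = str(jsonStr)
--     jsonStr = jsonStr.replace("jk", '"jk"')
--     fields = [
--             "efccid",
--             "srcid",
--             "cmpid",
--             "num",
--             "srcname",
--             "cmp",
--             "cmpesc",
--             "cmplnk",
--             "loc",
--             "country",
--             "zip",
--             "city",
--             "title",
--             "locid",
--             "rd"]
--
--     for field in fields:
--         jsonStr = jsonStr.replace(","+field+":", ',"'+field+'":')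
--     return jsonStr.replace("'",'"')
-- ===== SOURCE B (Python) =====
-- FIELDS = [
--     "efccid", "srcid", "cmpid", "num", "srcname", "cmp", "cmpesc",
--     "cmplnk", "loc", "country", "zip", "city", "title", "locid", "rd"]
--
--
-- def double_quote_json_fields(jsonStr):
--     s = str(jsonStr).replace("jk", '"jk"')
--     out = []
--     i = 0
--     n = len(s)
--     while i < n:
--         c = s[i]
--         if c == ",":
--             for f in FIELDS:
--                 if s.startswith(f + ":", i + 1):
--                     out.append(',"' + f + '":')
--                     i += len(f) + 2
--                     break
--             else:
--                 out.append(",")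
--                 i += 1
--         else:
--             out.append('"' if c == "'" else c)
--             i += 1
--     return "".join(out)
-- ===== Notes on version B (the rewrite author's own statement) =====
-- stated objective: alternative
-- what changed: Replaced A's fifteen sequential full-string field-quoting replace passes plus the final quote-normalising replace pass by a single left-to-right scan that quotes the first matching field name found right after a comma separator and normalises single quotes to double quotes while copying; the initial replace pass that quotes the jobkey field is kept unchanged.
import Mathlib
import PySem

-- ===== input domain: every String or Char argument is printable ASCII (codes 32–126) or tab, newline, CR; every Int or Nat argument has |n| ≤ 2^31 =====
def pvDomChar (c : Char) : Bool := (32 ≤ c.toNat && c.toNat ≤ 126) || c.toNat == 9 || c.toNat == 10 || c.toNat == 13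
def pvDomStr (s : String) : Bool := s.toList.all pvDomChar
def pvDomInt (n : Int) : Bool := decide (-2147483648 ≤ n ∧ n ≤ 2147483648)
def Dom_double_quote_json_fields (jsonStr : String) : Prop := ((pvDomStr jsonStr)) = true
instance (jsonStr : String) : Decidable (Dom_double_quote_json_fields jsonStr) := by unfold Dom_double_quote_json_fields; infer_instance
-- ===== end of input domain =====

-- B replaces A's fifteen sequential full-string field-quoting replace passes plus the final
-- quote-normalising pass by ONE left-to-right scan that quotes a field name found right after a
-- comma and normalises quotes as it copies; the initial jk-quoting replace pass is kept
-- (objective: alternative algorithm; return value proved equal on the whole domain).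

-- ===== PORT A =====
def fieldsA : List String :=
  ["efccid", "srcid", "cmpid", "num", "srcname", "cmp", "cmpesc", "cmplnk",
   "loc", "country", "zip", "city", "title", "locid", "rd"]

def double_quote_json_fields (jsonStr : String) : String :=
  let s1 := PySem.Str.replace jsonStr "jk" "\"jk\""
  let s2 := fieldsA.foldl
    (fun acc field => PySem.Str.replace acc ("," ++ field ++ ":") (",\"" ++ field ++ "\":")) s1
  PySem.Str.replace s2 "'" "\""

-- ===== PORT B =====
def fieldsB : List (List Char) :=
  ["efccid".toList, "srcid".toList, "cmpid".toList, "num".toList, "srcname".toList,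
   "cmp".toList, "cmpesc".toList, "cmplnk".toList, "loc".toList, "country".toList,
   "zip".toList, "city".toList, "title".toList, "locid".toList, "rd".toList]

-- B's inner `for f in FIELDS: if s.startswith(f + ":", i + 1): … break / else: …`
def firstFieldB (t : List Char) : Option (List Char) :=
  fieldsB.find? (fun f => PySem.Chars.startswith t (f ++ [':']))

-- B's `while i < n` scan; the index `i` into `s` becomes the remaining suffix of the char list.
def scanB : List Char → List Char
  | [] => []
  | c :: t =>
    if c = ',' then
      match firstFieldB t with
      | some f => ',' :: '"' :: (f ++ '"' :: ':' :: scanB (t.drop (f.length + 1)))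
      | none => ',' :: scanB t
    else (if c = '\'' then '"' else c) :: scanB t
termination_by s => s.length
decreasing_by
  · simp only [List.length_cons, List.length_drop]; omega
  · simp only [List.length_cons]; omega
  · simp only [List.length_cons]; omega

def double_quote_json_fields_alt (jsonStr : String) : String :=
  String.ofList (scanB (PySem.Str.replace jsonStr "jk" "\"jk\"").toList)

-- ===== PRECONDITION & SPEC =====
def Spec_double_quote_json_fields (jsonStr : String) (out : String) : Prop := out = double_quote_json_fields_alt jsonStr
instance (jsonStr : String) (out : String) : Decidable (Spec_double_quote_json_fields jsonStr out) := by unfold Spec_double_quote_json_fields; infer_instance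

-- ===== CLAIM (what is proved, stated in full; the proofs are below) =====
def Claim_equal_double_quote_json_fields : Prop := ∀ (jsonStr : String), Dom_double_quote_json_fields jsonStr → Spec_double_quote_json_fields jsonStr (double_quote_json_fields jsonStr)

-- ===== LEMMAS AND PROOFS =====

-- Python's str.replace as a direct structural recursion (equals PySem.Chars.replace for old ≠ []).
def repS (old new : List Char) : List Char → List Char
  | [] => []
  | c :: t =>
    if old.isPrefixOf (c :: t) then new ++ repS old new (t.drop (old.length - 1))
    else c :: repS old new t
termination_by l => l.length
decreasing_by
  · simp only [List.length_cons, List.length_drop]; omega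
  · simp only [List.length_cons]; omega

theorem repS_cons (old new : List Char) (c : Char) (t : List Char) :
    repS old new (c :: t) =
      if old.isPrefixOf (c :: t) then new ++ repS old new (t.drop (old.length - 1))
      else c :: repS old new t := by
  rw [repS]

theorem repS_cons_ne (old new : List Char) (c : Char) (t : List Char)
    (h : ¬ old.isPrefixOf (c :: t)) : repS old new (c :: t) = c :: repS old new t := by
  rw [repS_cons]; simp [h]

theorem replace_go_eq (old new : List Char) (h : old ≠ []) :
    ∀ (fuel : Nat) (l acc : List Char), l.length ≤ fuel →
      PySem.Chars.replace.go old new fuel l acc = acc.reverse ++ repS old new l := by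
  intro fuel
  induction fuel with
  | zero =>
    intro l acc hl
    have : l = [] := List.eq_nil_of_length_eq_zero (Nat.le_zero.mp hl)
    subst this; simp [PySem.Chars.replace.go, repS]
  | succ n ih =>
    intro l acc hl
    cases l with
    | nil => simp [PySem.Chars.replace.go, repS]
    | cons c t =>
      simp only [List.length_cons] at hl
      by_cases hp : old.isPrefixOf (c :: t)
      · have hdrop : List.drop old.length (c :: t) = t.drop (old.length - 1) := by
          cases old with
          | nil => exact absurd rfl h
          | cons o os => simp
        have hlen : (t.drop (old.length - 1)).length ≤ n := by
          simp only [List.length_drop]; omega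
        rw [PySem.Chars.replace.go, if_pos hp, hdrop, ih _ _ hlen, repS_cons, if_pos hp]
        simp [List.reverse_append]
      · rw [PySem.Chars.replace.go, if_neg hp,
          ih t (c :: acc) (by omega), repS_cons_ne _ _ _ _ hp]
        simp

theorem replace_eq_repS (s old new : List Char) (h : old ≠ []) :
    PySem.Chars.replace s old new = repS old new s := by
  rw [PySem.Chars.replace]
  simp only [List.isEmpty_eq_false_iff.mpr h]
  simpa using replace_go_eq old new h s.length s [] le_rfl

-- the pattern and replacement of one field pass, and the full chain of field passes
def patF (w : List Char) : List Char := ',' :: (w ++ [':'])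
def repF (w : List Char) : List Char := ',' :: '"' :: (w ++ ['"', ':'])
def chainF (fs : List (List Char)) (s : List Char) : List Char :=
  fs.foldl (fun a w => repS (patF w) (repF w) a) s
def qc (c : Char) : Char := if c = '\'' then '"' else c
def goodF (w : List Char) : Prop := w ≠ [] ∧ ',' ∉ w ∧ '\'' ∉ w ∧ '"' ∉ w

theorem goodFieldsB : ∀ w ∈ fieldsB, goodF w := by unfold goodF; decide

theorem repS_nil (old new : List Char) : repS old new [] = [] := by rw [repS]

theorem patF_not_prefix_of_ne (w : List Char) (c : Char) (t : List Char) (hc : c ≠ ',') :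
    ¬ (patF w).isPrefixOf (c :: t) := by
  simp only [patF, List.isPrefixOf_cons₂, Bool.and_eq_true, beq_iff_eq, not_and]
  intro h; exact absurd h.symm hc

theorem repS_commafree (w : List Char) :
    ∀ u v : List Char, ',' ∉ u →
      repS (patF w) (repF w) (u ++ v) = u ++ repS (patF w) (repF w) v := by
  intro u
  induction u with
  | nil => simp
  | cons c u' ih =>
    intro v hu
    have hc : c ≠ ',' := fun h => hu (by simp [h])
    rw [List.cons_append, repS_cons_ne _ _ _ _ (patF_not_prefix_of_ne w c _ hc),
      ih v (fun h => hu (by simp [h]))]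
    simp

theorem repS_match (w v : List Char) :
    repS (patF w) (repF w) (patF w ++ v) = repF w ++ repS (patF w) (repF w) v := by
  have hp : (patF w).isPrefixOf (patF w ++ v) :=
    List.isPrefixOf_iff_prefix.mpr (List.prefix_append _ _)
  rw [show patF w ++ v = ',' :: ((w ++ [':']) ++ v) by simp [patF]]
  rw [repS]
  have hp' : (patF w).isPrefixOf (',' :: ((w ++ [':']) ++ v)) := by
    rw [patF] at hp ⊢; simp only [List.cons_append] at hp ⊢; exact hp
  simp only [hp', if_pos]
  have hlen : (patF w).length - 1 = (w ++ [':']).length := by simp [patF]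
  rw [hlen, List.drop_left]

theorem prefix_repS_iff (w : List Char) :
    ∀ (t p : List Char), p ≠ [] → ',' ∉ p →
      (p.isPrefixOf (repS (patF w) (repF w) t)) = p.isPrefixOf t := by
  intro t
  induction t with
  | nil => intro p _ _; simp [repS_nil]
  | cons c t' ih =>
    intro p hp hpc
    obtain ⟨p0, p', rfl⟩ : ∃ a l, p = a :: l := by
      cases p with | nil => exact absurd rfl hp | cons a l => exact ⟨a, l, rfl⟩
    have hp0 : p0 ≠ ',' := fun h => hpc (by simp [h])
    by_cases hpre : (patF w).isPrefixOf (c :: t')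
    · have hc : c = ',' := by
        have := List.isPrefixOf_iff_prefix.mp hpre
        obtain ⟨r, hr⟩ := this
        have : patF w ≠ [] := by simp [patF]
        cases hw : patF w with
        | nil => exact absurd hw this
        | cons a l =>
          rw [hw] at hr
          have : a = ',' := by
            have : (a :: l : List Char) = patF w := hw.symm
            simp [patF] at this; exact this.1
          simp at hr
          rw [← hr.1, this]
      rw [repS]
      simp only [hpre, if_pos]
      have h1 : ((p0 :: p').isPrefixOf (repF w ++ repS (patF w) (repF w) ((t').drop ((patF w).length - 1)))) = false := by
        simp only [repF, List.cons_append, List.isPrefixOf_cons₂]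
        simp [hp0]
      have h2 : ((p0 :: p').isPrefixOf (c :: t')) = false := by
        simp [List.isPrefixOf_cons₂, hc, hp0]
      rw [h1, h2]
    · rw [repS_cons_ne _ _ _ _ hpre]
      simp only [List.isPrefixOf_cons₂]
      cases p' with
      | nil => simp
      | cons q qs =>
        rw [ih (q :: qs) (by simp) (fun h => hpc (by simp at h ⊢; right; exact h))]

theorem find?_congr' {α : Type} (l : List α) (p q : α → Bool)
    (h : ∀ a ∈ l, p a = q a) : l.find? p = l.find? q := by
  induction l with
  | nil => rfl
  | cons a l ih =>
    simp only [List.find?]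
    rw [h a (by simp)]
    cases q a
    · exact ih (fun x hx => h x (by simp [hx]))
    · rfl

theorem chainF_nil (fs : List (List Char)) : chainF fs [] = [] := by
  induction fs with
  | nil => rfl
  | cons f fs ih => simp only [chainF, List.foldl] at ih ⊢; rw [repS_nil]; exact ih

theorem chainF_commafree (fs : List (List Char)) :
    ∀ u v : List Char, ',' ∉ u → chainF fs (u ++ v) = u ++ chainF fs v := by
  induction fs with
  | nil => intro u v _; rfl
  | cons f fs ih =>
    intro u v hu
    simp only [chainF, List.foldl] at ih ⊢
    rw [repS_commafree f u v hu]
    exact ih u _ hu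

theorem chainF_comma_nomatch (fs : List (List Char)) (hg : ∀ w ∈ fs, goodF w) :
    ∀ t : List Char, (∀ w ∈ fs, ((w ++ [':']).isPrefixOf t) = false) →
      chainF fs (',' :: t) = ',' :: chainF fs t := by
  induction fs with
  | nil => intro t _; rfl
  | cons f fs ih =>
    intro t ht
    simp only [chainF, List.foldl] at ih ⊢
    have hnp : ¬ (patF f).isPrefixOf (',' :: t) := by
      simp only [patF, List.isPrefixOf_cons₂, Bool.and_eq_true, beq_iff_eq, not_and]
      intro _; rw [ht f (by simp)]; simp
    rw [repS_cons_ne _ _ _ _ hnp]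
    refine ih (fun w hw => hg w (by simp [hw])) _ (fun w hw => ?_)
    rw [prefix_repS_iff f t (w ++ [':']) (by simp) ?_]
    · exact ht w (by simp [hw])
    · have := hg w (by simp [hw])
      simp only [List.mem_append, List.mem_singleton]
      rintro (h | h)
      · exact this.2.1 h
      · exact absurd h (by decide)

theorem comma_not_mem_patTail (w : List Char) (hg : goodF w) : ',' ∉ w ++ [':'] := by
  simp only [List.mem_append, List.mem_singleton]
  rintro (h | h)
  · exact hg.2.1 h
  · exact absurd h (by decide)

theorem chainF_skip_rep (fs : List (List Char)) (hg : ∀ w ∈ fs, goodF w) :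
    ∀ (f X : List Char), goodF f →
      chainF fs (repF f ++ X) = repF f ++ chainF fs X := by
  induction fs with
  | nil => intro f X _; rfl
  | cons g fs ih =>
    intro f X hf
    simp only [chainF, List.foldl] at ih ⊢
    have hgg : goodF g := hg g (by simp)
    have hnp : ¬ (patF g).isPrefixOf (repF f ++ X) := by
      obtain ⟨g0, g', hgeq⟩ : ∃ a l, g = a :: l := by
        cases hge : g with
        | nil => exact absurd hge hgg.1
        | cons a l => exact ⟨a, l, rfl⟩
      have hg0 : g0 ≠ '"' := fun h => hgg.2.2.2 (by simp [hgeq, h])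
      simp only [repF, patF, hgeq, List.cons_append, List.isPrefixOf_cons₂]
      simp [hg0]
    rw [show repF f ++ X = ',' :: (('"' :: (f ++ ['"', ':'])) ++ X) by simp [repF]] at hnp ⊢
    rw [repS_cons_ne _ _ _ _ hnp]
    have hcf : ',' ∉ ('"' :: (f ++ ['"', ':'])) := by
      simp only [List.mem_cons, List.mem_append]
      rintro (h | h | h | h)
      · exact absurd h (by decide)
      · exact hf.2.1 h
      · exact absurd h (by decide)
      · exact absurd h (by decide)
    rw [repS_commafree g _ X hcf]
    have := ih (fun w hw => hg w (by simp [hw])) f (repS (patF g) (repF g) X) hf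
    simp only [repF] at this ⊢
    simpa using this

theorem chainF_comma_match (fs : List (List Char)) (hg : ∀ w ∈ fs, goodF w) :
    ∀ (f t' : List Char),
      fs.find? (fun w => (w ++ [':']).isPrefixOf ((f ++ [':']) ++ t')) = some f →
      goodF f →
      chainF fs (',' :: ((f ++ [':']) ++ t')) = repF f ++ chainF fs t' := by
  induction fs with
  | nil => intro f t' h _; simp at h
  | cons f1 fs ih =>
    intro f t' hfind hf
    simp only [chainF, List.foldl] at ih ⊢
    by_cases h1 : ((f1 ++ [':']).isPrefixOf ((f ++ [':']) ++ t')) = true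
    · have hff : f1 = f := by
        have heq := List.find?_cons_of_pos
          (p := fun w => (w ++ [':']).isPrefixOf ((f ++ [':']) ++ t')) (a := f1) (l := fs) h1
        exact Option.some.inj (heq.symm.trans hfind)
      subst hff
      rw [show (',' :: ((f1 ++ [':']) ++ t')) = patF f1 ++ t' by simp [patF]]
      rw [repS_match]
      exact chainF_skip_rep fs (fun w hw => hg w (by simp [hw])) f1 _ hf
    · have hfind' : fs.find? (fun w => (w ++ [':']).isPrefixOf ((f ++ [':']) ++ t')) = some f := by
        have heq := List.find?_cons_of_neg
          (p := fun w => (w ++ [':']).isPrefixOf ((f ++ [':']) ++ t')) (a := f1) (l := fs) h1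
        exact heq.symm.trans hfind
      have hnp : ¬ (patF f1).isPrefixOf (',' :: ((f ++ [':']) ++ t')) := by
        simp only [patF, List.isPrefixOf_cons₂, Bool.and_eq_true, beq_iff_eq, not_and]
        intro _ hcon; exact h1 (by simpa using hcon)
      rw [repS_cons_ne _ _ _ _ hnp]
      have hcf : ',' ∉ f ++ [':'] := comma_not_mem_patTail f hf
      rw [repS_commafree f1 _ t' hcf]
      have hg' : ∀ w ∈ fs, goodF w := fun w hw => hg w (by simp [hw])
      refine (ih hg' f (repS (patF f1) (repF f1) t') ?_ hf).trans ?_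
      · rw [← repS_commafree f1 _ t' hcf]
        refine (find?_congr' fs _ _ (fun w hw => ?_)).trans hfind'
        exact prefix_repS_iff f1 _ (w ++ [':']) (by simp) (comma_not_mem_patTail w (hg' w hw))
      · rfl

theorem repS_quote (t : List Char) : repS ['\''] ['"'] t = t.map qc := by
  induction t with
  | nil => simp [repS_nil]
  | cons c t ih =>
    rw [repS]
    by_cases hc : c = '\''
    · subst hc
      simp only [List.isPrefixOf_cons₂]
      simp [qc, ih]
    · have : ¬ (['\''] : List Char).isPrefixOf (c :: t) := by
        simp only [List.isPrefixOf_cons₂, Bool.and_eq_true, beq_iff_eq]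
        exact fun h => hc h.1.symm
      rw [if_neg (by simp [this])]
      simp [qc, hc, ih]

theorem map_qc_repF (f : List Char) (hf : goodF f) : (repF f).map qc = repF f := by
  simp only [repF, List.map_cons, List.map_append]
  have h1 : qc ',' = ',' := by decide
  have h2 : qc '"' = '"' := by decide
  have h3 : f.map qc = f := by
    apply List.map_congr_left ?_ |>.trans (List.map_id f)
    intro c hc
    have : c ≠ '\'' := fun h => hf.2.2.1 (h ▸ hc)
    simp [qc, this]
  simp [h1, h2, h3]
  decide

theorem main_scan : ∀ (n : Nat) (s : List Char), s.length ≤ n →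
    scanB s = (chainF fieldsB s).map qc := by
  intro n
  induction n with
  | zero =>
    intro s hs
    have : s = [] := List.eq_nil_of_length_eq_zero (Nat.le_zero.mp hs)
    subst this
    rw [chainF_nil]; rw [scanB]; rfl
  | succ n ih =>
    intro s hs
    cases s with
    | nil => rw [chainF_nil]; rw [scanB]; rfl
    | cons c t =>
      by_cases hc : c = ','
      · subst hc
        cases hfind : firstFieldB t with
        | none =>
          have hnone : ∀ w ∈ fieldsB, ((w ++ [':']).isPrefixOf t) = false := by
            intro w hw
            have hne := List.find?_eq_none.mp hfind w hw
            rw [Bool.eq_false_iff]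
            intro hcon
            exact hne hcon
          rw [chainF_comma_nomatch fieldsB goodFieldsB t hnone]
          rw [scanB]
          simp only [hfind]
          rw [ih t (by simpa using hs)]
          simp [qc]
        | some f =>
          have hmem : f ∈ fieldsB := List.mem_of_find?_eq_some hfind
          have hf : goodF f := goodFieldsB f hmem
          have hpre : (f ++ [':']).isPrefixOf t := by
            have := List.find?_some hfind
            simpa [PySem.Chars.startswith] using this
          obtain ⟨t', rfl⟩ : ∃ t', t = (f ++ [':']) ++ t' := by
            obtain ⟨t', ht'⟩ := List.isPrefixOf_iff_prefix.mp hpre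
            exact ⟨t', ht'.symm⟩
          have hfind' : fieldsB.find? (fun w => (w ++ [':']).isPrefixOf ((f ++ [':']) ++ t')) = some f := by
            refine (find?_congr' fieldsB _ _ (fun w _ => ?_)).trans hfind
            rfl
          rw [chainF_comma_match fieldsB goodFieldsB f t' hfind' hf]
          rw [scanB]
          simp only [hfind]
          have hdrop : ((f ++ [':']) ++ t').drop (f.length + 1) = t' := by
            rw [List.drop_left' (by simp)]
          rw [hdrop]
          rw [ih t' (by simp at hs ⊢; omega)]
          rw [List.map_append, map_qc_repF f hf]
          simp [repF]
      · have hchain : chainF fieldsB (c :: t) = c :: chainF fieldsB t := by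
          have := chainF_commafree fieldsB [c] t (by simpa using Ne.symm hc)
          simpa using this
        rw [hchain, scanB]
        simp only [if_neg hc]
        rw [ih t (by simpa using hs)]
        simp [qc]

-- A's field loop, at the char level
theorem strchain (fsS : List String) :
    ∀ x : String,
      (fsS.foldl (fun acc field =>
        PySem.Str.replace acc ("," ++ field ++ ":") (",\"" ++ field ++ "\":")) x).toList
      = chainF (fsS.map String.toList) x.toList := by
  induction fsS with
  | nil => intro x; rfl
  | cons f fs ih =>
    intro x
    simp only [List.foldl, List.map, chainF] at ih ⊢
    rw [ih]
    congr 1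
    rw [PySem.Str.toList_replace]
    rw [replace_eq_repS _ _ _ (by simp [String.toList_append])]
    congr 1
    · simp [patF, String.toList_append]
    · simp only [repF, String.toList_append]
      have : ("\"" : String).toList = ['"'] := rfl
      have h2 : ("," : String).toList = [','] := rfl
      have h3 : (",\"" : String).toList = [',', '"'] := rfl
      have h4 : ("\":" : String).toList = ['"', ':'] := rfl
      simp [h3, h4]

theorem fieldsA_map : fieldsA.map String.toList = fieldsB := by decide

theorem A_toList (s : String) :
    (double_quote_json_fields s).toList =
      (chainF fieldsB (PySem.Str.replace s "jk" "\"jk\"").toList).map qc := by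
  unfold double_quote_json_fields
  rw [PySem.Str.toList_replace]
  rw [replace_eq_repS _ _ _ (by decide)]
  rw [show ("'" : String).toList = ['\''] from rfl, show ("\"" : String).toList = ['"'] from rfl]
  rw [repS_quote]
  rw [strchain, fieldsA_map]

theorem B_toList (s : String) :
    (double_quote_json_fields_alt s).toList =
      scanB (PySem.Str.replace s "jk" "\"jk\"").toList := by
  unfold double_quote_json_fields_alt
  rw [String.toList_ofList]

-- ===== VERDICT (by name: the statement is the Claim_ definition above) =====
theorem double_quote_json_fields_spec : Claim_equal_double_quote_json_fields := by
  intro jsonStr _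
  unfold Spec_double_quote_json_fields
  apply String.toList_inj.mp
  rw [A_toList, B_toList]
  exact (main_scan _ _ le_rfl).symm
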